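-- pv_equiv track=rewrite | github.com/grapergrape/cypher-competition | preprocessing.py | split_into_substatements
-- ===== SOURCE A (Python) =====
-- def split_into_substatements(statments: list) -> list[str]:
--     """
--     A function that splits the complex directed_statements into sub-statements while simple ones remain the same. This process may alter the total number of nodes,
--     but the number of vectors and paths remains unaltered. That's whyit can be used for accurate direction validation and standardization purposes,
--     regardless of the complexity of the input Cypher query.
--
--     Input: list of a single directed_statment: ['(a)-[:RELATIONSHIP]->(b)<-[:RELATIONSHIP]-(c)']
--     Output: list of substatements like: ['(a)-[:RELATIONSHIP]->(b)', '(b)<-[:RELATIONSHIP]-(c)']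
--     """
--     substatements = []
--
--     for statment in statments:
--         nodes_indices = []
--         start_index = 0
--
--         while True:
--             # Find the start of the next body part
--             start_index = statment.find('(', start_index)
--             if start_index == -1:
--                 break
--
--             # Find the end of the body part
--             end_index = statment.find(')', start_index)
--             if end_index == -1:
--                 break
--
--             # Append the indices of the body part to nodes_indices list
--             nodes_indices.append((start_index, end_index))
--             # Move the start_index beyond the current body part
--             start_index = end_index + 1
--
--             # If we have two body parts, join them into a substatment
--             if len(nodes_indices) == 2:
--                 start, end = nodes_indices[0][0], nodes_indices[1][1]
--                 substatment = statment[start:end + 1]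
--                 #remove any instance of ! inside the substatment string
--                 substatment = substatment.replace('!', '')
--
--                 substatements.append(substatment)
--                 # Remove the first body part
--                 nodes_indices.pop(0)
--     return substatements
-- ===== SOURCE B (Python) =====
-- def split_into_substatements(statments: list) -> list[str]:
--     substatements = []
--     for statment in statments:
--         inside = False      # currently between '(' and its closing ')'
--         active = []         # in-progress substatement character buffers (at most two)
--         for c in statment:
--             if not inside and c == '(':
--                 active.append([])
--                 inside = True
--             if c != '!':
--                 for buf in active:
--                     buf.append(c)
--             if inside and c == ')':
--                 inside = False
--                 if len(active) == 2:
--                     substatements.append(''.join(active.pop(0)))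
--     return substatements
-- ===== Notes on version B (the rewrite author's own statement) =====
-- stated objective: alternative
-- what changed: Replaces A's find('(')/find(')') index-jumping scan with per-pair slicing and replace('!','') by a single character-level state machine that keeps at most two in-progress character buffers, skips '!' as it reads, and emits the older buffer when its second node closes.
import Mathlib
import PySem

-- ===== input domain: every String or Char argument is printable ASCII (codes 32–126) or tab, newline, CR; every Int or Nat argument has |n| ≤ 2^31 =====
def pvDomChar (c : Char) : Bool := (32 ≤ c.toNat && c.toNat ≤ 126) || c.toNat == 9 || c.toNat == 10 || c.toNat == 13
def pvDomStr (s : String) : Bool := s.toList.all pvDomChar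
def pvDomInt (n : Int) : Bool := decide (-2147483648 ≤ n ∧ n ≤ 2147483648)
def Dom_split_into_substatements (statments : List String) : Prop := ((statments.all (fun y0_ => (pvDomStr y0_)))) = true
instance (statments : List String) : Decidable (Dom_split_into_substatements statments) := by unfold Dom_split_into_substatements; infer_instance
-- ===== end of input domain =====

-- B replaces A's find()-jumping scan (slice + replace per pair) by a single character-level
-- state machine that builds each substatement's characters incrementally; same cost, different algorithm.


-- ===== PORT A =====
-- A's while-loop: advancing find('(')/find(')') scan, emitting a substatement (slice + replace)
-- each time a second node is found; fuel = len+1 bounds the loop (start strictly increases).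
def pvLoopA (s : List Char) (fuel : Nat) (start : Int)
    (pending : Option (Int × Int)) (acc : List String) : List String :=
  match fuel with
  | 0 => acc
  | fuel + 1 =>
    let si := PySem.Chars.findFrom s ['('] start none
    if si = -1 then acc
    else
      let ei := PySem.Chars.findFrom s [')'] si none
      if ei = -1 then acc
      else
        match pending with
        | none => pvLoopA s fuel (ei + 1) (some (si, ei)) acc
        | some p =>
          let sub := PySem.Chars.replace (PySem.Chars.slice s (some p.1) (some (ei + 1))) ['!'] []
          pvLoopA s fuel (ei + 1) (some (si, ei)) (acc ++ [String.ofList sub])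

def split_into_substatements (statments : List String) : List String :=
  statments.foldl (fun acc st => pvLoopA st.toList (st.toList.length + 1) 0 none acc) []

-- ===== PORT B =====
-- B: one pass over the characters with a boolean inside-parentheses state; at most two
-- in-progress character buffers (previous node's substatement and the open one); '!' is
-- skipped as it is read; the older buffer is emitted when its second node closes.
def pvStepB (st : Bool × List (List Char) × List String) (c : Char) :
    Bool × List (List Char) × List String :=
  let s1 := if ¬st.1 ∧ c = '(' then (true, st.2.1 ++ [([] : List Char)]) else (st.1, st.2.1)
  let active := if c ≠ '!' then s1.2.map (fun b => b ++ [c]) else s1.2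
  if s1.1 ∧ c = ')' then
    match active with
    | [b1, b2] => (false, [b2], st.2.2 ++ [String.ofList b1])
    | _ => (false, active, st.2.2)
  else (s1.1, active, st.2.2)

def split_into_substatements_alt (statments : List String) : List String :=
  statments.foldl (fun acc st => (st.toList.foldl pvStepB (false, [], acc)).2.2) []

-- ===== PRECONDITION & SPEC =====
def Spec_split_into_substatements (statments : List String) (out : List String) : Prop := out = split_into_substatements_alt statments
instance (statments : List String) (out : List String) : Decidable (Spec_split_into_substatements statments out) := by unfold Spec_split_into_substatements; infer_instance

-- ===== CLAIM (what is proved, stated in full; the proofs are below) =====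
def Claim_equal_split_into_substatements : Prop := ∀ (statments : List String), Dom_split_into_substatements statments → Spec_split_into_substatements statments (split_into_substatements statments)

-- ===== LEMMAS AND PROOFS =====

-- The common reference: the absolute (start, end) node spans of the string, by structural scan.
def pvScan (cs : List Char) (p : Nat) (open? : Option Nat) : List (Nat × Nat) :=
  match cs with
  | [] => []
  | c :: rest =>
    match open? with
    | none => if c = '(' then pvScan rest (p + 1) (some p) else pvScan rest (p + 1) none
    | some o => if c = ')' then (o, p) :: pvScan rest (p + 1) none else pvScan rest (p + 1) (some o)
def pvEmit (s : List Char) (spans : List (Nat × Nat)) : List String :=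
  (spans.zip spans.tail).map (fun pr =>
    String.ofList (((s.drop pr.1.1).take (pr.2.2 + 1 - pr.1.1)).filter (fun c => c ≠ '!')))

-- B's in-progress buffer for a node started at q, after reading up to position p.
def pvBuf (s : List Char) (q p : Nat) : List Char :=
  ((s.drop q).take (p - q)).filter (fun c => c ≠ '!')

lemma pvEmit_nil (s : List Char) : pvEmit s [] = [] := by simp [pvEmit]
lemma pvEmit_single (s : List Char) (a : Nat × Nat) : pvEmit s [a] = [] := by simp [pvEmit]
lemma pvEmit_cons_cons (s : List Char) (a b : Nat × Nat) (l : List (Nat × Nat)) :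
    pvEmit s (a :: b :: l) =
      String.ofList (((s.drop a.1).take (b.2 + 1 - a.1)).filter (fun c => c ≠ '!'))
        :: pvEmit s (b :: l) := by simp [pvEmit]
lemma pvEmit_head_snd (s : List Char) (a b : Nat × Nat) (l : List (Nat × Nat))
    (h : a.1 = b.1) : pvEmit s (a :: l) = pvEmit s (b :: l) := by
  cases l <;> simp [pvEmit, h]

lemma find_single (x : Char) (cs : List Char) (k : Nat) :
    PySem.Chars.find.go [x] cs k =
      match cs.findIdx? (fun c => c = x) with
      | some i => ((k + i : Nat) : Int)
      | none => -1 := by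
  induction cs generalizing k with
  | nil => simp [PySem.Chars.find.go]
  | cons c rest ih =>
    by_cases h : c = x
    · simp [PySem.Chars.find.go, List.isPrefixOf, List.findIdx?_cons, h]
    · simp only [PySem.Chars.find.go, List.isPrefixOf, List.findIdx?_cons]
      have hxc : (x == c) = false := by simp [Ne.symm h]
      simp only [hxc, Bool.false_and, if_false, decide_eq_true_eq, h, ih]
      cases hfi : rest.findIdx? (fun c => c = x) <;> simp [hfi] <;> push_cast <;> ring

lemma scan_none_of_no_open (cs : List Char) (p : Nat)
    (h : cs.findIdx? (fun c => c = '(') = none) : pvScan cs p none = [] := by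
  induction cs generalizing p with
  | nil => simp [pvScan]
  | cons c rest ih =>
    simp only [List.findIdx?_cons] at h
    by_cases hc : c = '('
    · simp [hc] at h
    · have hxc : (decide (c = '(')) = false := by simp [hc]
      simp only [hxc, if_false] at h
      cases hf : rest.findIdx? (fun c => c = '(') with
      | none => simp [pvScan, hc, ih _ hf]
      | some j => simp [hf] at h

lemma scan_skip_to_open (cs : List Char) (p j : Nat)
    (h : cs.findIdx? (fun c => c = '(') = some j) :
    pvScan cs p none = pvScan (cs.drop j) (p + j) none := by
  induction cs generalizing p j with
  | nil => simp at h
  | cons c rest ih =>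
    simp only [List.findIdx?_cons] at h
    by_cases hc : c = '('
    · simp [hc] at h; subst h; simp
    · have hxc : (decide (c = '(')) = false := by simp [hc]
      simp only [hxc, if_false] at h
      cases hf : rest.findIdx? (fun c => c = '(') with
      | none => simp [hf] at h
      | some j' =>
        simp [hf] at h; subst h
        simp [pvScan, hc, ih _ _ hf]; ring_nf

lemma scan_inside_none (cs : List Char) (p o : Nat)
    (h : cs.findIdx? (fun c => c = ')') = none) : pvScan cs p (some o) = [] := by
  induction cs generalizing p with
  | nil => simp [pvScan]
  | cons c rest ih =>
    simp only [List.findIdx?_cons] at h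
    by_cases hc : c = ')'
    · simp [hc] at h
    · have hxc : (decide (c = ')')) = false := by simp [hc]
      simp only [hxc, if_false] at h
      cases hf : rest.findIdx? (fun c => c = ')') with
      | none => simp [pvScan, hc, ih _ hf]
      | some j => simp [hf] at h

lemma scan_inside_some (cs : List Char) (p o j : Nat)
    (h : cs.findIdx? (fun c => c = ')') = some j) :
    pvScan cs p (some o) = (o, p + j) :: pvScan (cs.drop (j + 1)) (p + j + 1) none := by
  induction cs generalizing p j with
  | nil => simp at h
  | cons c rest ih =>
    simp only [List.findIdx?_cons] at h
    by_cases hc : c = ')'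
    · simp [hc] at h; subst h; simp [pvScan, hc]
    · have hxc : (decide (c = ')')) = false := by simp [hc]
      simp only [hxc, if_false] at h
      cases hf : rest.findIdx? (fun c => c = ')') with
      | none => simp [hf] at h
      | some j' =>
        simp [hf] at h; subst h
        simp [pvScan, hc, ih _ _ hf]; constructor <;> ring_nf

lemma replace_go_filter (l acc : List Char) (fuel : Nat) (h : l.length ≤ fuel) :
    PySem.Chars.replace.go ['!'] [] fuel l acc = acc.reverse ++ l.filter (fun c => c ≠ '!') := by
  induction l generalizing acc fuel with
  | nil => cases fuel <;> simp [PySem.Chars.replace.go]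
  | cons c rest ih =>
    cases fuel with
    | zero => simp at h
    | succ fuel =>
      simp only [List.length_cons, Nat.add_le_add_iff_right] at h
      by_cases hc : c = '!'
      · simp [PySem.Chars.replace.go, List.isPrefixOf, hc, ih _ _ h]
      · have : ('!' == c) = false := by simp [Ne.symm hc]
        simp [PySem.Chars.replace.go, List.isPrefixOf, this, ih _ _ h, hc]

lemma replace_single_filter (l : List Char) :
    PySem.Chars.replace l ['!'] [] = l.filter (fun c => c ≠ '!') := by
  simpa using replace_go_filter l [] l.length le_rfl

-- findFrom bridge for a one-char needle at a Nat start
lemma findFrom_single (s : List Char) (x : Char) (k : Nat) (hk : k ≤ s.length) :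
    PySem.Chars.findFrom s [x] (k : Int) none =
      match (s.drop k).findIdx? (fun c => c = x) with
      | some i => ((k + i : Nat) : Int)
      | none => -1 := by
  rw [PySem.Chars.findFrom_natCast s [x] k hk]
  have : PySem.Chars.find (s.drop k) [x] =
      match (s.drop k).findIdx? (fun c => c = x) with
      | some i => ((i : Nat) : Int)
      | none => -1 := by
    simpa using find_single x (s.drop k) 0
  rw [this]
  cases hfi : (s.drop k).findIdx? (fun c => c = x) with
  | none => simp
  | some i => simp

lemma loopA_eq (s : List Char) (fuel : Nat) :
    ∀ (k : Nat) (pd : Option (Int × Int)) (q : Option Nat) (acc : List String),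
      k ≤ s.length → s.length - k < fuel →
      (match pd, q with
       | none, none => True
       | some pr, some qq => pr.1 = (qq : Int)
       | _, _ => False) →
      pvLoopA s fuel (k : Int) pd acc =
        acc ++ pvEmit s ((q.map (fun a => (a, a))).toList ++ pvScan (s.drop k) k none) := by
  induction fuel with
  | zero => intro k pd q acc hk hf _; omega
  | succ fuel ih =>
    intro k pd q acc hk hf hpq
    rw [pvLoopA]
    simp only [findFrom_single s '(' k hk]
    cases hfi : (s.drop k).findIdx? (fun c => c = '(') with
    | none =>
      rw [scan_none_of_no_open _ _ hfi]
      cases pd <;> cases q <;> simp_all [pvEmit_nil, pvEmit_single]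
    | some i =>
      obtain ⟨hi, hgi, -⟩ := List.findIdx?_eq_some_iff_getElem.mp hfi
      have hilen : i < s.length - k := by simpa using hi
      have hsi : k + i < s.length := by omega
      have hgetsi : s[k + i]'hsi = '(' := by
        rw [List.getElem_drop] at hgi; simpa using hgi
      have hne : ((k + i : Nat) : Int) ≠ -1 := by omega
      simp only [hne, if_false]
      have hsile : k + i ≤ s.length := le_of_lt hsi
      have hdropsi : s.drop (k + i) = '(' :: s.drop (k + i + 1) := by
        rw [List.drop_eq_getElem_cons hsi, hgetsi]
      have hfj' : (s.drop (k+i)).findIdx? (fun c => c = ')') =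
          Option.map (· + 1) ((s.drop (k+i+1)).findIdx? (fun c => c = ')')) := by
        rw [hdropsi, List.findIdx?_cons]; simp
      have hscan : pvScan (s.drop k) k none = pvScan (s.drop (k+i+1)) (k+i+1) (some (k+i)) := by
        rw [scan_skip_to_open _ _ _ hfi, List.drop_drop, hdropsi]
        simp [pvScan]
      rw [findFrom_single s ')' (k + i) hsile, hfj', hscan]
      cases hfj : (s.drop (k + i + 1)).findIdx? (fun c => c = ')') with
      | none =>
        rw [scan_inside_none _ _ _ hfj]
        cases pd <;> cases q <;> simp_all [pvEmit_nil, pvEmit_single]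
      | some m =>
        simp only [Option.map_some]
        obtain ⟨hmlt, hgm, -⟩ := List.findIdx?_eq_some_iff_getElem.mp hfj
        have heilt : k + i + 1 + m < s.length := by
          have := hmlt; simp at this; omega
        rw [scan_inside_some _ _ _ _ hfj]
        have hdd : (s.drop (k+i+1)).drop (m+1) = s.drop (k+i+1+m+1) := by
          rw [List.drop_drop]; ring_nf
        rw [hdd]
        have hne3 : ¬(((k+i+(m+1) : Nat):Int) = -1) := by omega
        rw [if_neg hne3]
        have harg : (((k+i+(m+1) : Nat):Int) + 1) = ((k+i+1+m+1 : Nat) : Int) := by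
          push_cast; ring
        cases pd with
        | none =>
          cases q with
          | none =>
            rw [harg]
            have hrec := ih (k+i+1+m+1) (some (((k+i:Nat):Int), ((k+i+(m+1):Nat):Int))) (some (k+i)) acc
              (by omega) (by omega) (by simp)
            rw [hrec]
            congr 1
            simp only [Option.map_some, Option.toList_some, Option.map_none, Option.toList_none, List.nil_append]
            rw [pvEmit_head_snd s ((k+i), (k+i+1+m)) ((k+i), (k+i)) _ rfl]
            simp
          | some qq => exact absurd hpq (by simp)
        | some pr =>
          cases q with
          | none => exact absurd hpq (by simp)
          | some qq =>
            have hpr1 : pr.1 = (qq : Int) := hpq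
            rw [harg]
            show pvLoopA s fuel ((k+i+1+m+1 : Nat) : Int) (some (((k+i:Nat):Int), ((k+i+(m+1):Nat):Int)))
                (acc ++ [String.ofList (PySem.Chars.replace (PySem.Chars.slice s (some pr.1) (some ((k+i+1+m+1:Nat):Int))) ['!'] [])]) = _
            have hrec := ih (k+i+1+m+1) (some (((k+i:Nat):Int), ((k+i+(m+1):Nat):Int))) (some (k+i))
              (acc ++ [String.ofList (PySem.Chars.replace (PySem.Chars.slice s (some pr.1) (some ((k+i+1+m+1 : Nat):Int))) ['!'] [])])
              (by omega) (by omega) (by simp)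
            rw [hrec, List.append_assoc]
            congr 1
            simp only [Option.map_some, Option.toList_some, List.cons_append, List.nil_append, List.singleton_append]
            rw [pvEmit_cons_cons, pvEmit_head_snd s ((k+i), (k+i+1+m)) ((k+i), (k+i)) _ rfl]
            congr 1
            rw [hpr1]
            simp only [PySem.Chars.slice_eq_listSlice, PySem.List.slice_natCast, replace_single_filter]

lemma pvBuf_step (s : List Char) (q p : Nat) (c : Char) (hq : q ≤ p) (hp : p < s.length)
    (hc : s[p]'hp = c) :
    pvBuf s q (p + 1) = pvBuf s q p ++ (if c ≠ '!' then [c] else []) := by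
  unfold pvBuf
  have h1 : p + 1 - q = (p - q) + 1 := by omega
  have h2 : (s.drop q)[p - q]? = some c := by
    rw [List.getElem?_drop]
    have : q + (p - q) = p := by omega
    rw [this, List.getElem?_eq_getElem hp, hc]
  rw [h1, List.take_succ, h2]
  simp only [Option.toList_some, List.filter_append]
  by_cases hb : c = '!' <;> simp [hb]

lemma pvBuf_self (s : List Char) (p : Nat) : pvBuf s p p = [] := by simp [pvBuf]

lemma foldB_eq (s : List Char) (cs : List Char) :
    ∀ (p : Nat) (prev open? : Option Nat) (out : List String),
      cs = s.drop p →
      (∀ q ∈ prev, q ≤ p) → (∀ o ∈ open?, o ≤ p) →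
      (cs.foldl pvStepB (open?.isSome,
          (prev.map (fun q => pvBuf s q p)).toList ++ (open?.map (fun o => pvBuf s o p)).toList,
          out)).2.2
        = out ++ pvEmit s ((prev.map (fun a => (a, a))).toList ++ pvScan cs p open?) := by
  induction cs with
  | nil =>
    intro p prev open? out hcs hprev hopen
    cases prev <;> cases open? <;> simp [pvScan, pvEmit_nil, pvEmit_single]
  | cons c rest ih =>
    intro p prev open? out hcs hprev hopen
    have hp : p < s.length := by
      by_contra h
      rw [List.drop_eq_nil_of_le (by omega)] at hcs
      simp at hcs
    have hgp : s[p]'hp = c := by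
      have := hcs
      rw [List.drop_eq_getElem_cons hp] at this
      exact (List.cons.injEq .. ▸ this.symm).1
    have hrest : rest = s.drop (p + 1) := by
      have := hcs
      rw [List.drop_eq_getElem_cons hp] at this
      exact (List.cons.injEq .. ▸ this.symm).2.symm
    cases open? with
    | none =>
      by_cases hc : c = '('
      · -- open a node
        subst hc
        have hstep : ∀ bufs outv, pvStepB (false, bufs, outv) '(' =
            (true, (bufs ++ [[]]).map (fun b => b ++ ['(']), outv) := by
          intro bufs outv
          simp [pvStepB]
        have hb : pvBuf s p (p+1) = ['('] := by
          rw [pvBuf_step s p p '(' le_rfl hp hgp, pvBuf_self]; simp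
        cases prev with
        | none =>
          rw [List.foldl_cons]
          have hst : pvStepB (false, [], out) '(' = (true, [pvBuf s p (p+1)], out) := by
            simp [pvStepB, hb]
          simp only [Option.isSome_none, Option.map_none, Option.toList_none, List.nil_append,
            List.append_nil, hst]
          have := ih (p+1) none (some p) out hrest (by simp) (by simp)
          simp only [Option.isSome_some, Option.map_some, Option.toList_some, Option.map_none,
            Option.toList_none, List.nil_append] at this
          rw [this]
          simp [pvScan]
        | some q =>
          have hq : q ≤ p := hprev q rfl
          have hbq : pvBuf s q p ++ ['('] = pvBuf s q (p+1) := by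
            rw [pvBuf_step s q p '(' hq hp hgp]; simp
          rw [List.foldl_cons]
          have hst : pvStepB (false, [pvBuf s q p], out) '(' =
              (true, [pvBuf s q (p+1), pvBuf s p (p+1)], out) := by
            simp [pvStepB, hb, hbq]
          simp only [Option.isSome_none, Option.map_some, Option.toList_some, Option.map_none,
            Option.toList_none, List.append_nil, hst]
          have := ih (p+1) (some q) (some p) out hrest (by simpa using by omega) (by simp)
          simp only [Option.isSome_some, Option.map_some, Option.toList_some, List.cons_append,
            List.nil_append] at this
          rw [this]
          simp [pvScan]
      · -- stay outside
        have hstep : ∀ bufs outv, pvStepB (false, bufs, outv) c =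
            (false, if c ≠ '!' then bufs.map (fun b => b ++ [c]) else bufs, outv) := by
          intro bufs outv
          have : ¬(False ∧ c = ')') := by simp
          simp [pvStepB, hc]
        cases prev with
        | none =>
          rw [List.foldl_cons]
          simp only [Option.isSome_none, Option.map_none, Option.toList_none, List.nil_append,
            List.append_nil, hstep]
          have := ih (p+1) none none out hrest (by simp) (by simp)
          simp only [Option.isSome_none, Option.map_none, Option.toList_none, List.nil_append] at this
          rw [show (if c ≠ '!' then ([] : List (List Char)).map (fun b => b ++ [c]) else []) = [] by simp]
          rw [this]
          simp [pvScan, hc]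
        | some q =>
          have hq : q ≤ p := hprev q rfl
          rw [List.foldl_cons]
          simp only [Option.isSome_none, Option.map_some, Option.toList_some, Option.map_none,
            Option.toList_none, List.append_nil, hstep]
          have := ih (p+1) (some q) none out hrest (by simpa using by omega) (by simp)
          simp only [Option.isSome_none, Option.map_some, Option.toList_some, Option.map_none,
            Option.toList_none, List.append_nil] at this
          have hbq : pvBuf s q (p+1) = pvBuf s q p ++ (if c ≠ '!' then [c] else []) :=
            pvBuf_step s q p c hq hp hgp
          rw [show (if c ≠ '!' then [pvBuf s q p].map (fun b => b ++ [c]) else [pvBuf s q p]) = [pvBuf s q (p+1)] by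
            by_cases hb : c = '!' <;> simp [hb, hbq]]
          rw [this]
          simp [pvScan, hc]
    | some o =>
      have ho : o ≤ p := hopen o rfl
      by_cases hc : c = ')'
      · subst hc
        cases prev with
        | none =>
          rw [List.foldl_cons]
          have hstep : pvStepB (true, [pvBuf s o p], out) ')' =
              (false, [pvBuf s o (p+1)], out) := by
            simp [pvStepB, pvBuf_step s o p ')' ho hp hgp]
          simp only [Option.isSome_some, Option.map_none, Option.toList_none, Option.map_some,
            Option.toList_some, List.nil_append, hstep]
          have := ih (p+1) (some o) none out hrest (by simpa using by omega) (by simp)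
          simp only [Option.isSome_none, Option.map_some, Option.toList_some, Option.map_none,
            Option.toList_none, List.append_nil, List.nil_append] at this
          rw [this]
          rw [show pvScan (')' :: rest) p (some o) = (o, p) :: pvScan rest (p+1) none by simp [pvScan]]
          rw [pvEmit_head_snd s (o, p) (o, o) _ rfl]
          simp
        | some q =>
          have hq : q ≤ p := hprev q rfl
          rw [List.foldl_cons]
          have hstep : pvStepB (true, [pvBuf s q p, pvBuf s o p], out) ')' =
              (false, [pvBuf s o (p+1)], out ++ [String.ofList (pvBuf s q (p+1))]) := by
            simp [pvStepB, pvBuf_step s o p ')' ho hp hgp, pvBuf_step s q p ')' hq hp hgp]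
          simp only [Option.isSome_some, Option.map_some, Option.toList_some, List.cons_append,
            List.nil_append, hstep]
          have := ih (p+1) (some o) none (out ++ [String.ofList (pvBuf s q (p+1))]) hrest
            (by simpa using by omega) (by simp)
          simp only [Option.isSome_none, Option.map_some, Option.toList_some, Option.map_none,
            Option.toList_none, List.append_nil, List.nil_append] at this
          rw [this]
          rw [show pvScan (')' :: rest) p (some o) = (o, p) :: pvScan rest (p+1) none by simp [pvScan]]
          simp only [List.singleton_append, List.append_assoc]
          congr 1
          rw [pvEmit_cons_cons, pvEmit_head_snd s (o, p) (o, o) _ rfl]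
          simp [pvBuf]
      · -- stay inside
        have hstep : ∀ bufs outv, pvStepB (true, bufs, outv) c =
            (true, if c ≠ '!' then bufs.map (fun b => b ++ [c]) else bufs, outv) := by
          intro bufs outv
          simp [pvStepB, hc]
        cases prev with
        | none =>
          rw [List.foldl_cons]
          simp only [Option.isSome_some, Option.map_none, Option.toList_none, Option.map_some,
            Option.toList_some, List.nil_append, hstep]
          have := ih (p+1) none (some o) out hrest (by simp) (by simpa using by omega)
          simp only [Option.isSome_some, Option.map_none, Option.toList_none, Option.map_some,
            Option.toList_some, List.nil_append] at this
          rw [show (if c ≠ '!' then [pvBuf s o p].map (fun b => b ++ [c]) else [pvBuf s o p]) = [pvBuf s o (p+1)] by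
            by_cases hb : c = '!' <;> simp [hb, pvBuf_step s o p c ho hp hgp]]
          rw [this]
          simp [pvScan, hc]
        | some q =>
          have hq : q ≤ p := hprev q rfl
          rw [List.foldl_cons]
          simp only [Option.isSome_some, Option.map_some, Option.toList_some, List.cons_append,
            List.nil_append, hstep]
          have := ih (p+1) (some q) (some o) out hrest (by simpa using by omega) (by simpa using by omega)
          simp only [Option.isSome_some, Option.map_some, Option.toList_some, List.cons_append,
            List.nil_append] at this
          rw [show (if c ≠ '!' then [pvBuf s q p, pvBuf s o p].map (fun b => b ++ [c]) else [pvBuf s q p, pvBuf s o p]) = [pvBuf s q (p+1), pvBuf s o (p+1)] by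
            by_cases hb : c = '!' <;> simp [hb, pvBuf_step s o p c ho hp hgp, pvBuf_step s q p c hq hp hgp]]
          rw [this]
          simp [pvScan, hc]

-- ===== VERDICT (by name: the statement is the Claim_ definition above) =====

theorem split_into_substatements_spec : Claim_equal_split_into_substatements := by
  intro statments _
  unfold Spec_split_into_substatements split_into_substatements split_into_substatements_alt
  have hfun : ∀ (acc : List String) (st : String),
      pvLoopA st.toList (st.toList.length + 1) 0 none acc =
        (st.toList.foldl pvStepB (false, [], acc)).2.2 := by
    intro acc st
    have hA := loopA_eq st.toList (st.toList.length + 1) 0 none none acc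
      (Nat.zero_le _) (by omega) trivial
    have hB := foldB_eq st.toList st.toList 0 none none acc List.drop_zero.symm
      (by simp) (by simp)
    simp only [List.drop_zero, Option.map_none, Option.toList_none, List.nil_append,
      Option.isSome_none, List.append_nil] at hA hB
    rw [hB]
    simpa using hA
  exact congrFun (congrFun (congrArg List.foldl
    (funext fun acc => funext fun st => hfun acc st)) []) statments
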